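-- pv_equiv track=rewrite | github.com/metterian/coding-test-practice | 구현/문자열압축/solution.py | compressed
-- ===== SOURCE A (Python) =====
-- def compressed(s, step):
--     n = len(s)
--     compress = [s[start:start+step] for start in range(0, n, step)]
--     string = []
--
--     compress.append('')
--     coef = 0
--     for i in range(len(compress)-1):
--         if compress[i] == compress[i+1]:
--             coef += 1
--
--         elif coef:
--             string.append(str(coef+1)+compress[i])
--             coef = 0
--
--         else:
--             string.append(compress[i])
--     string = "".join(string)
--     return len(string)
-- ===== SOURCE B (Python) =====
-- def compressed(s, step):
--     chunks = [s[i:i+step] for i in range(0, len(s), step)]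
--     m = len(chunks)
--     total = 0
--     i = 0
--     while i < m:
--         j = i + 1
--         while j < m and chunks[j] == chunks[i]:
--             j += 1
--         run = j - i
--         total += len(chunks[i]) if run == 1 else len(str(run)) + len(chunks[i])
--         i = j
--     return total
-- ===== Notes on version B (the rewrite author's own statement) =====
-- stated objective: simpler
-- what changed: B scans each run of equal chunks with a two-pointer loop and accumulates the compressed length as an integer directly, instead of A's sentinel-terminated adjacent-pair comparison that builds the compressed string and measures it.
import Mathlib
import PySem

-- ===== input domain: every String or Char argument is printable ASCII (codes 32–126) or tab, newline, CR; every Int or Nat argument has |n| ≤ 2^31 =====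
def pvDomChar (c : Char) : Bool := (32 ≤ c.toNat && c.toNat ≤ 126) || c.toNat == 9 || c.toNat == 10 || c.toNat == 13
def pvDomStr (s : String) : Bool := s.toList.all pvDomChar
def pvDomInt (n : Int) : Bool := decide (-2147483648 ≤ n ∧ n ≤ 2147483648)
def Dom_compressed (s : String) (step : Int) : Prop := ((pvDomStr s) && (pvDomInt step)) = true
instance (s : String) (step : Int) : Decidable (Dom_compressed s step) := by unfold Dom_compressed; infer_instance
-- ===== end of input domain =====

-- B accumulates the compressed length as an integer with a two-pointer run scan over the chunk
-- list, instead of A's sentinel-terminated adjacent-pair loop that builds the compressed string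
-- and measures it (objective: simpler; same asymptotic cost).

-- ===== PORT A =====
def compressed (s : String) (step : Int) : Int :=
  let cs := s.toList
  let n : Int := PySem.List.len cs
  let compress0 := (PySem.List.pyRange 0 n step).map
      (fun start => PySem.List.slice cs (some start) (some (start + step)))
  let compress := compress0 ++ [[]]          -- compress.append('')
  let res := (PySem.List.pyRange 0 (PySem.List.len compress - 1) 1).foldl
    (fun (st : List (List Char) × Int) i =>
      if PySem.List.pyGetD compress i [] = PySem.List.pyGetD compress (i + 1) [] then
        (st.1, st.2 + 1)
      else if st.2 ≠ 0 then
        (st.1 ++ [PySem.Int.toChars (st.2 + 1) ++ PySem.List.pyGetD compress i []], 0)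
      else
        (st.1 ++ [PySem.List.pyGetD compress i []], 0))
    ([], 0)
  PySem.List.len res.1.flatten

-- ===== PORT B =====
-- inner `while j < m and chunks[j] == chunks[i]` loop of Source B
def altRunEnd (chunks : List (List Char)) (m : Int) (head : List Char) (j : Int) : Int :=
  if h : j < m ∧ PySem.List.pyGetD chunks j [] = head then
    altRunEnd chunks m head (j + 1)
  else j
termination_by (m - j).toNat
decreasing_by have := h.1; omega

-- needed by altOuter's termination proof
theorem le_altRunEnd (chunks : List (List Char)) (m : Int) (head : List Char) (j : Int) :
    j ≤ altRunEnd chunks m head j := by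
  by_cases h : j < m ∧ PySem.List.pyGetD chunks j [] = head
  · rw [altRunEnd, dif_pos h]
    have := le_altRunEnd chunks m head (j + 1)
    omega
  · rw [altRunEnd, dif_neg h]
termination_by (m - j).toNat
decreasing_by have := h.1; omega

-- outer `while i < m` loop of Source B
def altOuter (chunks : List (List Char)) (m : Int) (i : Int) (total : Int) : Int :=
  if h : i < m then
    let j := altRunEnd chunks m (PySem.List.pyGetD chunks i []) (i + 1)
    let run := j - i
    let piece :=
      if run = 1 then PySem.List.len (PySem.List.pyGetD chunks i [])
      else PySem.List.len (PySem.Int.toChars run) + PySem.List.len (PySem.List.pyGetD chunks i [])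
    altOuter chunks m j (total + piece)
  else total
termination_by (m - i).toNat
decreasing_by
  have h1 := le_altRunEnd chunks m (PySem.List.pyGetD chunks i []) (i + 1)
  omega

def compressed_alt (s : String) (step : Int) : Int :=
  let cs := s.toList
  let chunks := (PySem.List.pyRange 0 (PySem.List.len cs) step).map
      (fun i => PySem.List.slice cs (some i) (some (i + step)))
  let m := PySem.List.len chunks
  altOuter chunks m 0 0

-- ===== PRECONDITION & SPEC =====
-- Python's range(0, n, 0) raises ValueError, so both programs raise exactly when step == 0.
def Pre_compressed (s : String) (step : Int) : Prop := step ≠ 0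
instance (s : String) (step : Int) : Decidable (Pre_compressed s step) := by
  unfold Pre_compressed; infer_instance

def pvWitness_compressed : String × Int := ("aabbaccc", 1)

def Spec_compressed (s : String) (step : Int) (out : Int) : Prop := out = compressed_alt s step
instance (s : String) (step : Int) (out : Int) : Decidable (Spec_compressed s step out) := by
  unfold Spec_compressed; infer_instance

-- ===== CLAIM (what is proved, stated in full; the proofs are below) =====
def Claim_equal_compressed : Prop := ∀ (s : String) (step : Int),
  Dom_compressed s step → Pre_compressed s step → Spec_compressed s step (compressed s step)

-- ===== LEMMAS AND PROOFS =====

-- length of the leading run of chunks equal to x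
def runCount (x : List Char) : List (List Char) → Nat
  | [] => 0
  | y :: ys => if y = x then runCount x ys + 1 else 0

-- length contributed by one run of c copies of chunk x
def emit2 (c : Int) (x : List Char) : Int :=
  if c = 1 then PySem.List.len x
  else PySem.List.len (PySem.Int.toChars c) + PySem.List.len x

-- compressed length of a chunk list, run by run
def rle : List (List Char) → Int
  | [] => 0
  | x :: xs => emit2 ((runCount x xs : Int) + 1) x + rle (xs.drop (runCount x xs))
termination_by l => l.length
decreasing_by simp

theorem rle_nil : rle [] = 0 := by rw [rle.eq_def]

theorem rle_cons (x : List Char) (xs : List (List Char)) :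
    rle (x :: xs) = emit2 ((runCount x xs : Int) + 1) x + rle (xs.drop (runCount x xs)) := by
  rw [rle.eq_def]

-- ---- B-side: the index loops compute rle ----

theorem altRunEnd_eq (chunks : List (List Char)) (head : List Char) (j : Nat) :
    altRunEnd chunks (chunks.length : Int) head (j : Int)
      = ((j + runCount head (chunks.drop j) : Nat) : Int) := by
  by_cases hj : j < chunks.length
  · have hget : PySem.List.pyGetD chunks (j : Int) [] = chunks[j] := by
      rw [PySem.List.pyGetD_natCast, List.getD_eq_getElem _ _ hj]
    have hdrop : chunks.drop j = chunks[j] :: chunks.drop (j + 1) :=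
      List.drop_eq_getElem_cons hj
    by_cases he : chunks[j] = head
    · rw [altRunEnd, dif_pos ⟨by exact_mod_cast hj, by rw [hget, he]⟩]
      have ih := altRunEnd_eq chunks head (j + 1)
      rw [hdrop, he]
      simp only [runCount, reduceIte]
      push_cast at ih ⊢
      omega
    · rw [altRunEnd, dif_neg (by rw [hget]; tauto)]
      rw [hdrop]
      simp [runCount, he]
  · rw [altRunEnd, dif_neg (by intro hcon; exact hj (by exact_mod_cast hcon.1))]
    rw [List.drop_eq_nil_of_le (by omega)]
    simp [runCount]
termination_by chunks.length - j
decreasing_by omega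

theorem altOuter_eq (chunks : List (List Char)) (i : Nat) (total : Int) :
    altOuter chunks (chunks.length : Int) (i : Int) total
      = total + rle (chunks.drop i) := by
  by_cases hi : i < chunks.length
  · have hget : PySem.List.pyGetD chunks (i : Int) [] = chunks[i] := by
      rw [PySem.List.pyGetD_natCast, List.getD_eq_getElem _ _ hi]
    have hrun : altRunEnd chunks (chunks.length : Int) chunks[i] ((i : Int) + 1)
        = ((i + 1 + runCount chunks[i] (chunks.drop (i + 1)) : Nat) : Int) := by
      have h := altRunEnd_eq chunks chunks[i] (i + 1)
      push_cast at h ⊢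
      omega
    rw [altOuter, dif_pos (show (i : Int) < (chunks.length : Int) by exact_mod_cast hi)]
    simp only [hget, hrun]
    set r := runCount chunks[i] (chunks.drop (i + 1)) with hr
    have ih := altOuter_eq chunks (i + 1 + r)
        (total + (if ((i + 1 + r : Nat) : Int) - (i : Int) = 1
          then PySem.List.len chunks[i]
          else PySem.List.len (PySem.Int.toChars (((i + 1 + r : Nat) : Int) - (i : Int)))
            + PySem.List.len chunks[i]))
    rw [ih]
    have hdrop : chunks.drop i = chunks[i] :: chunks.drop (i + 1) :=
      List.drop_eq_getElem_cons hi
    rw [hdrop, rle_cons, ← hr, List.drop_drop]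
    have harg : ((i + 1 + r : Nat) : Int) - (i : Int) = (r : Int) + 1 := by push_cast; omega
    rw [harg]
    by_cases hc : (r : Int) + 1 = 1
    · simp only [emit2, if_pos hc]
      omega
    · simp only [emit2, if_neg hc]
      omega
  · rw [altOuter, dif_neg (by intro hcon; exact hi (by exact_mod_cast hcon))]
    rw [List.drop_eq_nil_of_le (by omega)]
    simp [rle_nil]
termination_by chunks.length - i
decreasing_by omega

-- ---- A-side: the sentinel loop computes rle ----

def pairs (cs : List (List Char)) : List (List Char × List Char) :=
  cs.zip (cs.tail ++ [[]])

def gA (st : List (List Char) × Int) (p : List Char × List Char) : List (List Char) × Int :=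
  if p.1 = p.2 then (st.1, st.2 + 1)
  else if st.2 ≠ 0 then (st.1 ++ [PySem.Int.toChars (st.2 + 1) ++ p.1], 0)
  else (st.1 ++ [p.1], 0)

def flatLen (l : List (List Char)) : Int := PySem.List.len l.flatten

def emit1 (x : List Char) (coef : Int) : Int :=
  if coef ≠ 0 then PySem.List.len (PySem.Int.toChars (coef + 1)) + PySem.List.len x
  else PySem.List.len x

-- what A's loop contributes from the remaining chunks with a pending count coef
def rleCo : List (List Char) → Int → Int
  | [], _ => 0
  | x :: xs, coef =>
    match xs with
    | [] => if x = ([] : List Char) then 0 else emit1 x coef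
    | y :: ys => if x = y then rleCo (y :: ys) (coef + 1) else emit1 x coef + rleCo (y :: ys) 0

theorem pairs_cons_nil (x : List Char) : pairs [x] = [(x, ([] : List Char))] := by
  simp [pairs]

theorem pairs_cons_cons (x y : List Char) (ys : List (List Char)) :
    pairs (x :: y :: ys) = (x, y) :: pairs (y :: ys) := by
  simp [pairs]

theorem foldA_pairs (cs : List (List Char)) :
    ∀ (string : List (List Char)) (coef : Int),
    flatLen ((pairs cs).foldl gA (string, coef)).1 = flatLen string + rleCo cs coef := by
  induction cs with
  | nil => intro string coef; simp [pairs, rleCo]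
  | cons x xs ih =>
    intro string coef
    match xs with
    | [] =>
      rw [pairs_cons_nil]
      simp only [List.foldl_cons, List.foldl_nil]
      by_cases hx : x = ([] : List Char)
      · simp [gA, rleCo, hx]
      · by_cases hc : coef = 0
        · simp [gA, rleCo, hx, hc, emit1, flatLen]
        · simp [gA, rleCo, hx, hc, emit1, flatLen]
    | y :: ys =>
      rw [pairs_cons_cons]
      simp only [List.foldl_cons]
      by_cases hxy : x = y
      · rw [show gA (string, coef) (x, y) = (string, coef + 1) from by simp [gA, hxy]]
        rw [ih string (coef + 1)]
        simp [rleCo, hxy]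
      · by_cases hc : coef = 0
        · rw [show gA (string, coef) (x, y) = (string ++ [x], 0) from by simp [gA, hxy, hc]]
          rw [ih _ 0]
          simp [rleCo, hxy, emit1, hc, flatLen] <;> ring
        · rw [show gA (string, coef) (x, y)
              = (string ++ [PySem.Int.toChars (coef + 1) ++ x], 0) from by simp [gA, hxy, hc]]
          rw [ih _ 0]
          simp [rleCo, hxy, emit1, hc, flatLen] <;> ring

theorem emit1_eq (x : List Char) (coef : Int) : emit1 x coef = emit2 (coef + 1) x := by
  by_cases hc : coef = 0
  · simp [emit1, emit2, hc]
  · simp [emit1, emit2, hc, show coef + 1 ≠ 1 from by omega]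

theorem rleCo_run (x : List Char) (hx : x ≠ []) :
    ∀ (xs : List (List Char)) (coef : Int),
    rleCo (x :: xs) coef
      = emit2 (coef + (runCount x xs : Int) + 1) x + rleCo (xs.drop (runCount x xs)) 0 := by
  intro xs
  induction xs with
  | nil =>
    intro coef
    simp [rleCo, hx, runCount, emit1_eq]
  | cons y ys ih =>
    intro coef
    by_cases hxy : x = y
    · have h1 : rleCo (x :: y :: ys) coef = rleCo (x :: ys) (coef + 1) := by
        subst hxy; simp [rleCo]
      have h2 : runCount x (y :: ys) = runCount x ys + 1 := by
        simp [runCount, hxy]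
      rw [h1, ih (coef + 1), h2]
      simp only [List.drop_succ_cons]
      push_cast
      ring_nf
    · have h1 : rleCo (x :: y :: ys) coef = emit1 x coef + rleCo (y :: ys) 0 := by
        simp [rleCo, hxy]
      have h2 : runCount x (y :: ys) = 0 := by
        simp [runCount, show y ≠ x from fun h => hxy h.symm]
      rw [h1, h2, emit1_eq]
      simp

theorem rle_eq (cs : List (List Char)) (h : ([] : List Char) ∉ cs) : rleCo cs 0 = rle cs := by
  match cs with
  | [] => simp [rleCo, rle_nil]
  | x :: xs =>
    have hx : x ≠ [] := fun hx' => h (by simp [hx'])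
    rw [rleCo_run x hx xs 0, rle_cons]
    have hsub : ([] : List Char) ∉ xs.drop (runCount x xs) := by
      intro hmem
      exact h (List.mem_cons_of_mem _ (List.mem_of_mem_drop hmem))
    rw [rle_eq (xs.drop (runCount x xs)) hsub]
    norm_num
termination_by cs.length
decreasing_by simp

-- index-fold of A over the sentinel list = fold of gA over adjacent pairs
theorem foldA_index (cs : List (List Char)) :
    ((PySem.List.pyRange 0 (PySem.List.len (cs ++ [[]]) - 1) 1).foldl
      (fun (st : List (List Char) × Int) i =>
        if PySem.List.pyGetD (cs ++ [[]]) i [] = PySem.List.pyGetD (cs ++ [[]]) (i + 1) [] then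
          (st.1, st.2 + 1)
        else if st.2 ≠ 0 then
          (st.1 ++ [PySem.Int.toChars (st.2 + 1) ++ PySem.List.pyGetD (cs ++ [[]]) i []], 0)
        else
          (st.1 ++ [PySem.List.pyGetD (cs ++ [[]]) i []], 0))
      ([], 0))
    = (pairs cs).foldl gA ([], 0) := by
  have hlen : PySem.List.len (cs ++ [[]]) - 1 = ((pairs cs).length : Int) := by
    simp [pairs, List.length_zip]
    omega
  rw [hlen]
  refine (PySem.List.foldl_congr_mem _ _
      (fun st i => gA st (PySem.List.pyGetD (pairs cs) i (([] : List Char), ([] : List Char)))) _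
      ?_).trans
    (PySem.List.foldl_pyRange_zero_pyGetD' (pairs cs) (([] : List Char), ([] : List Char)) gA ([], 0))
  intro st i hi
  rw [PySem.List.mem_pyRange_one] at hi
  obtain ⟨h0, h1⟩ := hi
  obtain ⟨k, rfl⟩ : ∃ k : Nat, (k : Int) = i := ⟨i.toNat, Int.toNat_of_nonneg h0⟩
  have hklt : k < (pairs cs).length := by exact_mod_cast h1
  have hkcs : k < cs.length := by
    have : (pairs cs).length ≤ cs.length := by simp [pairs, List.length_zip]
    omega
  have htail : k < (cs.tail ++ [([] : List Char)]).length := by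
    simp
    omega
  have hpair : (pairs cs)[k] = (cs[k], (cs.tail ++ [([] : List Char)])[k]) := by
    simp [pairs]
  have hp : PySem.List.pyGetD (pairs cs) (k : Int) (([] : List Char), ([] : List Char))
      = (pairs cs)[k] := by
    rw [PySem.List.pyGetD_natCast, List.getD_eq_getElem _ _ hklt]
  have hg1 : PySem.List.pyGetD (cs ++ [[]]) (k : Int) [] = cs[k] := by
    have hk' : k < (cs ++ [([] : List Char)]).length := by simp; omega
    rw [PySem.List.pyGetD_natCast, List.getD_eq_getElem _ _ hk',
      List.getElem_append_left hkcs]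
  have hg2 : PySem.List.pyGetD (cs ++ [[]]) ((k : Int) + 1) []
      = (cs.tail ++ [([] : List Char)])[k] := by
    have hcast : ((k : Int) + 1) = ((k + 1 : Nat) : Int) := by push_cast; ring
    have hlt : k + 1 < (cs ++ [([] : List Char)]).length := by simp; omega
    rw [hcast, PySem.List.pyGetD_natCast, List.getD_eq_getElem _ _ hlt]
    rcases cs with _ | ⟨c, t⟩
    · simp at hkcs
    · simp
  rw [hg1, hg2]
  simp [gA, hp, hpair]

theorem A_side (ch : List (List Char)) (hne : ([] : List Char) ∉ ch) :
    PySem.List.len (((PySem.List.pyRange 0 (PySem.List.len (ch ++ [[]]) - 1) 1).foldl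
      (fun (st : List (List Char) × Int) i =>
        if PySem.List.pyGetD (ch ++ [[]]) i [] = PySem.List.pyGetD (ch ++ [[]]) (i + 1) [] then
          (st.1, st.2 + 1)
        else if st.2 ≠ 0 then
          (st.1 ++ [PySem.Int.toChars (st.2 + 1) ++ PySem.List.pyGetD (ch ++ [[]]) i []], 0)
        else
          (st.1 ++ [PySem.List.pyGetD (ch ++ [[]]) i []], 0))
      ([], 0)).1.flatten) = rle ch := by
  have h2 : flatLen ((pairs ch).foldl gA ([], 0)).1 = rleCo ch 0 := by
    have := foldA_pairs ch [] 0
    simpa [flatLen] using this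
  rw [foldA_index ch, ← rle_eq ch hne, ← h2]
  rfl

-- chunks are nonempty when the step is positive
theorem chunks_ne_nil (cs : List Char) (step : Int) (hpos : 0 < step) :
    ([] : List Char) ∉ (PySem.List.pyRange 0 (PySem.List.len cs) step).map
      (fun i => PySem.List.slice cs (some i) (some (i + step))) := by
  intro hmem
  rw [List.mem_map] at hmem
  obtain ⟨i, hi, hslice⟩ := hmem
  rw [PySem.List.mem_pyRange_iff_of_pos hpos] at hi
  have h0 : 0 ≤ i := hi.1
  have h1 : i < (cs.length : Int) := by
    have := hi.2.1
    simpa using this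
  rw [PySem.List.slice_toNat cs h0 (by omega)] at hslice
  have hlen := congrArg List.length hslice
  simp at hlen
  omega

-- a negative step gives an empty chunk list
theorem pyRange_neg_empty (n step : Int) (hn : 0 ≤ n) (hs : step < 0) :
    PySem.List.pyRange 0 n step = [] := by
  have h1 : ¬ step = 0 := by omega
  have h2 : ¬ (0 : Int) < step := by omega
  have h3 : ¬ n < (0 : Int) := by omega
  simp [PySem.List.pyRange, h1, h2, h3]

-- ===== VERDICT (by name: the statement is the Claim_ definition above) =====
theorem compressed_spec : Claim_equal_compressed := by
  intro s step _ hpre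
  show compressed s step = compressed_alt s step
  simp only [compressed, compressed_alt]
  rcases lt_trichotomy step 0 with hneg | hzero | hpos
  · rw [pyRange_neg_empty _ _ (by rw [PySem.List.len_eq]; exact Int.natCast_nonneg _) hneg]
    simp only [List.map_nil]
    rw [show altOuter ([] : List (List Char)) (PySem.List.len ([] : List (List Char))) 0 0 = 0
      from by rw [altOuter, dif_neg (by simp)]]
    rw [List.nil_append,
      show PySem.List.len ([([] : List Char)]) - 1 = 0 from by simp,
      PySem.List.pyRange_one_eq_nil (le_refl 0)]
    simp
  · exact absurd hzero hpre
  · have hne := chunks_ne_nil s.toList step hpos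
    rw [A_side _ hne]
    have hB := altOuter_eq ((PySem.List.pyRange 0 ((s.toList.length : Int)) step).map
      (fun i => PySem.List.slice s.toList (some i) (some (i + step)))) 0 0
    simp only [Nat.cast_zero, List.drop_zero, zero_add] at hB
    rw [PySem.List.len_eq, PySem.List.len_eq]
    exact hB.symm
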